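-- pv_equiv track=rewrite | github.com/klanary/programmers_js | 프로그래머스/2/84512. 모음 사전/모음 사전.py | solution
-- ===== SOURCE A (Python) =====
-- def solution(word):
--     answer = 0
--     weight=[781,156,31,6,1]
--     alpha=['A','E','I','O','U']
--     for i in range(len(word)):
--         num=alpha.index(word[i])
--         answer+=weight[i]*num
--     answer+=len(word)
--     return answer
-- ===== SOURCE B (Python) =====
-- def solution(word):
--     # Lexicographic enumeration: list every vowel word of length <= 5 in
--     # dictionary (pre-)order and return the position of `word` in it.
--     def gen(prefix):
--         words = [prefix]
--         if len(prefix) < 5: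
--             for c in "AEIOU":
--                 words.extend(gen(prefix + c))
--         return words
--     return gen("").index(word)
-- ===== Notes on version B (the rewrite author's own statement) =====
-- stated objective: alternative
-- what changed: B replaces A's closed-form weighted sum with an explicit lexicographic enumeration: it recursively generates every vowel word of length <= 5 in dictionary order and returns the position of the input word in that list.
import Mathlib
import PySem

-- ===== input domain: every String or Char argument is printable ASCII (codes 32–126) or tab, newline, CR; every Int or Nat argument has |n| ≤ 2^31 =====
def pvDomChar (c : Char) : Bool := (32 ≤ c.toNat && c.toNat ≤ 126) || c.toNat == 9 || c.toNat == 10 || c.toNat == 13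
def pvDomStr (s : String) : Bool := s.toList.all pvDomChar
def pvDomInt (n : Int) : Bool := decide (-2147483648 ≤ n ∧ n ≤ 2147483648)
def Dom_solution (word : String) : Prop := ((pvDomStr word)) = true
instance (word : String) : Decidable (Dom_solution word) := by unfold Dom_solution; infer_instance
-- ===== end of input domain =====

-- B replaces A's closed-form weighted sum with an explicit lexicographic enumeration of the
-- 3906-word vowel dictionary (objective: alternative algorithm, not faster).

-- ===== PORT A =====
def solution (word : String) : Int :=
  let weight : List Int := [781, 156, 31, 6, 1]
  let alpha : List Char := ['A', 'E', 'I', 'O', 'U']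
  let answer : Int :=
    (PySem.List.pyRange 0 (PySem.Str.len word) 1).foldl
      (fun answer i =>
        -- word[i] is always in range inside the loop; alpha.index and weight[i] raise
        -- (ValueError / IndexError) exactly where the .getD defaults would fire — excluded by Pre_
        let num : Int := ((PySem.List.index? alpha ((PySem.Str.pyGet? word i).getD ' ')).getD 0 : Nat)
        answer + (PySem.List.pyGetD weight i 0) * num)
      0
  answer + PySem.Str.len word

-- ===== PORT B =====
-- gen(prefix): the prefix itself, then (if len < 5) the subtrees of its 5 one-vowel extensions, in order
def genWords (pre : List Char) : List (List Char) :=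
  pre ::
    (if _h : pre.length < 5 then
      (['A', 'E', 'I', 'O', 'U']).flatMap (fun c => genWords (pre ++ [c]))
    else [])
termination_by 5 - pre.length
decreasing_by simp; omega

def solution_alt (word : String) : Int :=
  -- gen("").index(word): ValueError when word is absent — excluded by Pre_
  ((PySem.List.index? (genWords []) word.toList).getD 0 : Nat)

-- ===== PRECONDITION & SPEC =====
-- A raises (ValueError on a non-vowel character, IndexError beyond position 5) exactly when the
-- word is not a vowel word of length ≤ 5; B raises ValueError on the same inputs.
def Pre_solution (word : String) : Prop :=
  word.toList.length ≤ 5 ∧ word.toList.all (· ∈ (['A', 'E', 'I', 'O', 'U'] : List Char)) = true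
instance (word : String) : Decidable (Pre_solution word) := by unfold Pre_solution; infer_instance
def pvWitness_solution : String := "EIO"

def Spec_solution (word : String) (out : Int) : Prop := out = solution_alt word
instance (word : String) (out : Int) : Decidable (Spec_solution word out) := by unfold Spec_solution; infer_instance

-- ===== CLAIM (what is proved, stated in full; the proofs are below) =====
def Claim_equal_solution : Prop := ∀ (word : String), Dom_solution word → Pre_solution word → Spec_solution word (solution word)

-- ===== LEMMAS AND PROOFS =====

-- number of nodes in a subtree whose root sits d levels above the maximum depth
def cnt : Nat → Nat
  | 0 => 1
  | d + 1 => 1 + 5 * cnt d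

-- position of a vowel
def vnum (c : Char) : Nat := (['A', 'E', 'I', 'O', 'U'] : List Char).idxOf c

-- pre-order index of the word p ++ s inside the subtree rooted at p, d levels above max depth
def idxF : List Char → Nat → Nat
  | [], _ => 0
  | c :: s, d => 1 + vnum c * cnt (d - 1) + idxF s (d - 1)

theorem gen_length (p : List Char) : (genWords p).length = cnt (5 - p.length) := by
  rw [genWords]
  split_ifs with h
  · have key : ∀ c : Char, (genWords (p ++ [c])).length = cnt (4 - p.length) := by
      intro c
      have := gen_length (p ++ [c])
      simpa [Nat.sub_sub] using this
    have h5 : 5 - p.length = (4 - p.length) + 1 := by omega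
    simp [List.flatMap, key, h5, cnt]
    ring
  · have h5 : 5 - p.length = 0 := by omega
    simp [h5, cnt]
termination_by 5 - p.length
decreasing_by simp; omega

theorem gen_prefix (p q : List Char) (hq : q ∈ genWords p) : p <+: q := by
  rw [genWords] at hq
  rcases List.mem_cons.1 hq with rfl | hq
  · exact List.prefix_refl _
  · split_ifs at hq with h
    · rcases List.mem_flatMap.1 hq with ⟨c, _, hmem⟩
      have := gen_prefix (p ++ [c]) q hmem
      exact (List.prefix_append p [c]).trans this
    · simp at hq
termination_by 5 - p.length
decreasing_by simp; omega

theorem not_mem_gen_of_ne (p s : List Char) (c c' : Char) (hne : c' ≠ c) :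
    p ++ c :: s ∉ genWords (p ++ [c']) := by
  intro hmem
  have hpre := gen_prefix _ _ hmem
  have : [c'] <+: c :: s := (List.prefix_append_right_inj p).1 (by simpa using hpre)
  rcases this with ⟨t, ht⟩
  simp at ht
  exact hne ht.1

theorem index?_append_of_not_mem {α : Type} [BEq α] [LawfulBEq α] (l₁ l₂ : List α) (v : α)
    (hv : v ∉ l₁) :
    PySem.List.index? (l₁ ++ l₂) v = (PySem.List.index? l₂ v).map (· + l₁.length) := by
  induction l₁ with
  | nil => simp
  | cons x xs ih =>
    have hx : x ≠ v := by rintro rfl; exact hv (List.mem_cons_self ..)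
    have hxs : v ∉ xs := fun h => hv (List.mem_cons_of_mem _ h)
    rw [List.cons_append, PySem.List.index?_cons_of_ne _ hx, ih hxs]
    cases PySem.List.index? l₂ v with
    | none => simp
    | some k => simp; omega

theorem index?_flatMap_gen (p s : List Char) (c : Char) (l1 l2 : List Char)
    (hc : c ∉ l1)
    (hmem : p ++ c :: s ∈ genWords (p ++ [c])) :
    PySem.List.index? ((l1 ++ c :: l2).flatMap (fun c' => genWords (p ++ [c']))) (p ++ c :: s)
      = (PySem.List.index? (genWords (p ++ [c])) (p ++ c :: s)).map
          (· + l1.length * cnt (4 - p.length)) := by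
  induction l1 with
  | nil =>
    rw [List.nil_append, List.flatMap_cons,
      PySem.List.index?_append_of_mem _ hmem]
    cases PySem.List.index? (genWords (p ++ [c])) (p ++ c :: s) <;> simp
  | cons a l1 ih =>
    have hac : a ≠ c := by rintro rfl; exact hc (List.mem_cons_self ..)
    have hcl : c ∉ l1 := fun h => hc (List.mem_cons_of_mem _ h)
    rw [List.cons_append, List.flatMap_cons,
      index?_append_of_not_mem _ _ _ (not_mem_gen_of_ne p s c a hac), ih hcl]
    have hlen : (genWords (p ++ [a])).length = cnt (4 - p.length) := by
      rw [gen_length]; congr 1; simp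
    rw [hlen]
    cases PySem.List.index? (genWords (p ++ [c])) (p ++ c :: s) with
    | none => simp
    | some k => simp; ring

theorem gen_index (s : List Char) (p : List Char)
    (hv : ∀ c ∈ s, c ∈ (['A', 'E', 'I', 'O', 'U'] : List Char))
    (hl : p.length + s.length ≤ 5) :
    PySem.List.index? (genWords p) (p ++ s) = some (idxF s (5 - p.length)) := by
  induction s generalizing p with
  | nil =>
    rw [genWords, List.append_nil, PySem.List.index?_cons_self]
    simp [idxF]
  | cons c s ih =>
    have hlt : p.length < 5 := by simp at hl; omega
    have hc : c ∈ (['A', 'E', 'I', 'O', 'U'] : List Char) := hv c (List.mem_cons_self ..)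
    have hih : PySem.List.index? (genWords (p ++ [c])) ((p ++ [c]) ++ s)
        = some (idxF s (5 - (p ++ [c]).length)) :=
      ih (p ++ [c]) (fun d hd => hv d (List.mem_cons_of_mem _ hd)) (by simp at hl ⊢; omega)
    have hx : (p ++ [c]) ++ s = p ++ c :: s := by simp
    rw [hx] at hih
    have hmem : p ++ c :: s ∈ genWords (p ++ [c]) :=
      (PySem.List.index?_isSome_iff _ _).1 (by rw [hih]; rfl)
    have hdec : ∃ l1 l2 : List Char,
        (['A', 'E', 'I', 'O', 'U'] : List Char) = l1 ++ c :: l2 ∧ c ∉ l1 ∧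
        l1.length = vnum c := by
      fin_cases hc
      · exact ⟨[], ['E','I','O','U'], by decide, by decide, by decide⟩
      · exact ⟨['A'], ['I','O','U'], by decide, by decide, by decide⟩
      · exact ⟨['A','E'], ['O','U'], by decide, by decide, by decide⟩
      · exact ⟨['A','E','I'], ['U'], by decide, by decide, by decide⟩
      · exact ⟨['A','E','I','O'], [], by decide, by decide, by decide⟩
    obtain ⟨l1, l2, hV, hnotin, hlen1⟩ := hdec
    have hne : p ≠ p ++ c :: s := by
      intro h
      have := congrArg List.length h
      simp at this
    rw [genWords, dif_pos hlt, PySem.List.index?_cons_of_ne _ hne, hV,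
      index?_flatMap_gen p s c l1 l2 hnotin hmem, hih]
    have h45 : 5 - (p ++ [c]).length = 4 - p.length := by simp
    have h54 : 5 - p.length - 1 = 4 - p.length := by omega
    rw [h45]
    simp only [idxF, hlen1, h54, Option.map_some]
    congr 1
    ring

theorem idx_vowel (c : Char) (hc : c ∈ (['A', 'E', 'I', 'O', 'U'] : List Char)) :
    (List.idxOf? c (['A', 'E', 'I', 'O', 'U'] : List Char)).getD 0 = vnum c := by
  fin_cases hc <;> decide

theorem solution_spec : Claim_equal_solution := by
  intro word _hd hpre
  obtain ⟨hl, hv'⟩ := hpre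
  have hv : ∀ c ∈ word.toList, c ∈ (['A', 'E', 'I', 'O', 'U'] : List Char) := by
    simpa [List.all_eq_true] using hv'
  unfold Spec_solution
  have hB : solution_alt word = ((idxF word.toList 5 : Nat) : Int) := by
    have hg := gen_index word.toList [] hv (by simpa using hl)
    rw [PySem.List.index?_eq_idxOf?] at hg
    simp only [List.nil_append] at hg
    simp [solution_alt, hg]
  rw [hB]
  rcases hs : word.toList with _ | ⟨c0, _ | ⟨c1, _ | ⟨c2, _ | ⟨c3, _ | ⟨c4, _ | ⟨c5, t⟩⟩⟩⟩⟩⟩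
  case nil =>
    simp [solution, PySem.Str.len_eq, hs, idxF]
  case cons.nil =>
    have h0 := idx_vowel c0 (hv c0 (by rw [hs]; simp))
    have hr : PySem.List.pyRange 0 1 1 = [0] := by decide
    simp only [solution, PySem.Str.len_eq, PySem.Str.pyGet?_eq, hs]
    norm_num [hr, List.foldl, PySem.List.pyGet?, PySem.List.pyIdx?, PySem.List.pyGetD, h0,
      idxF, cnt, List.getElem_cons_succ, List.getElem_cons_zero]
    ring
  case cons.cons.nil =>
    have h0 := idx_vowel c0 (hv c0 (by rw [hs]; simp))
    have h1 := idx_vowel c1 (hv c1 (by rw [hs]; simp))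
    have hr : PySem.List.pyRange 0 2 1 = [0, 1] := by decide
    simp only [solution, PySem.Str.len_eq, PySem.Str.pyGet?_eq, hs]
    norm_num [hr, List.foldl, PySem.List.pyGet?, PySem.List.pyIdx?, PySem.List.pyGetD, h0, h1,
      idxF, cnt, List.getElem_cons_succ, List.getElem_cons_zero]
    ring
  case cons.cons.cons.nil =>
    have h0 := idx_vowel c0 (hv c0 (by rw [hs]; simp))
    have h1 := idx_vowel c1 (hv c1 (by rw [hs]; simp))
    have h2 := idx_vowel c2 (hv c2 (by rw [hs]; simp))
    have hr : PySem.List.pyRange 0 3 1 = [0, 1, 2] := by decide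
    simp only [solution, PySem.Str.len_eq, PySem.Str.pyGet?_eq, hs]
    norm_num [hr, List.foldl, PySem.List.pyGet?, PySem.List.pyIdx?, PySem.List.pyGetD, h0, h1, h2,
      idxF, cnt]
    simp [h2]
    ring
  case cons.cons.cons.cons.nil =>
    have h0 := idx_vowel c0 (hv c0 (by rw [hs]; simp))
    have h1 := idx_vowel c1 (hv c1 (by rw [hs]; simp))
    have h2 := idx_vowel c2 (hv c2 (by rw [hs]; simp))
    have h3 := idx_vowel c3 (hv c3 (by rw [hs]; simp))
    have hr : PySem.List.pyRange 0 4 1 = [0, 1, 2, 3] := by decide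
    simp only [solution, PySem.Str.len_eq, PySem.Str.pyGet?_eq, hs]
    norm_num [hr, List.foldl, PySem.List.pyGet?, PySem.List.pyIdx?, PySem.List.pyGetD, h0, h1, h2, h3,
      idxF, cnt]
    simp [h2, h3]
    ring
  case cons.cons.cons.cons.cons.nil =>
    have h0 := idx_vowel c0 (hv c0 (by rw [hs]; simp))
    have h1 := idx_vowel c1 (hv c1 (by rw [hs]; simp))
    have h2 := idx_vowel c2 (hv c2 (by rw [hs]; simp))
    have h3 := idx_vowel c3 (hv c3 (by rw [hs]; simp))
    have h4 := idx_vowel c4 (hv c4 (by rw [hs]; simp))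
    have hr : PySem.List.pyRange 0 5 1 = [0, 1, 2, 3, 4] := by decide
    simp only [solution, PySem.Str.len_eq, PySem.Str.pyGet?_eq, hs]
    norm_num [hr, List.foldl, PySem.List.pyGet?, PySem.List.pyIdx?, PySem.List.pyGetD, h0, h1, h2, h3, h4,
      idxF, cnt]
    simp [h2, h3, h4]
    ring
  case cons.cons.cons.cons.cons.cons =>
    rw [hs] at hl
    simp at hl
    omega
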